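-- pv_equiv track=rewrite | github.com/nohtaray/competitive-programming.py | matrix.py | invert_matrix_bit
-- ===== SOURCE A (Python) =====
-- def gauss_jordan_bit(rows, n_cols, n_rhs=0):
--     """
--     掃き出し法で標準形にする
--     O(HW^2)
--     :param list of int rows: rows[i] は i 行目のビット列
--     :param int n_cols: 拡大行列全体の列数 (ビット列の長さ)
--     :param int n_rhs: 拡大部分の列数 (連立方程式なら 1, 逆行列計算なら n_cols/2)
--     """
--     rows = rows[:]
--     n_rows = len(rows)
--     rank = 0
--     for w in reversed(range(n_rhs, n_cols)):
--         if rank >= n_rows: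
--             break
--         col = [a >> w & 1 for a in rows]
--         if not any(col[rank:]):
--             continue
--         h = col.index(1, rank)
--         pivot = rows[h]
--         for i in range(n_rows):
--             if col[i]:
--                 rows[i] ^= pivot
--         rows[h] = rows[rank]
--         rows[rank] = pivot
--         rank += 1
--     return rows, rank
--
-- def invert_matrix_bit(rows: list[int]) -> list[int] | None:
--     """
--     F2 体でビット列表現された行列 rows の逆行列を求める。
--     rows を拡大係数行列 [rows | I] にし、掃き出し法を用いて rows^-1 を得る。
--
--     :param rows: rows[i] は i 行目のビット列（長さ W の行列）
--     :return: 逆行列（各行がビット列）または None（逆行列が存在しない場合）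
--     """
--     H = W = len(rows)
--
--     # 単位行列 I を右に拡張して [rows | I] を構築
--     mat = [row << W | (1 << (W - i - 1)) for i, row in enumerate(rows)]
--
--     # 拡張部分は W 列
--     mat, rank = gauss_jordan_bit(mat, W * 2, W)
--
--     if rank < W:
--         return None  # 非正則、逆行列は存在しない
--
--     # 各行の下位 W ビットが逆行列
--     inverse = [row & ((1 << W) - 1) for row in mat]
--     return inverse
-- ===== SOURCE B (Python) =====
-- def invert_matrix_bit(rows: list[int]) -> list[int] | None:
--     """Two-phase Gauss-Jordan over F2: forward elimination to upper-triangular form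
--     with a separate inverse accumulator, then back-substitution clearing the
--     above-diagonal entries pivot by pivot."""
--     n = len(rows)
--     # state: (matrix row, inverse-accumulator row); the accumulator starts as I
--     st = [(row, 1 << (n - 1 - i)) for i, row in enumerate(rows)]
--     # phase 1: forward elimination; bail out early if a pivot column is dead
--     for k in range(n):
--         bit = n - 1 - k
--         p = next((i for i in range(k, n) if st[i][0] >> bit & 1), None)
--         if p is None:
--             return None  # singular
--         st[k], st[p] = st[p], st[k]
--         wk, vk = st[k]
--         for i in range(k + 1, n):
--             if st[i][0] >> bit & 1:
--                 st[i] = (st[i][0] ^ wk, st[i][1] ^ vk)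
--     # phase 2: eliminate above-diagonal entries, top pivot first
--     for k in range(n):
--         bit = n - 1 - k
--         wk, vk = st[k]
--         for i in range(k):
--             if st[i][0] >> bit & 1:
--                 st[i] = (st[i][0] ^ wk, st[i][1] ^ vk)
--     return [v for _, v in st]
-- ===== Notes on version B (the rewrite author's own statement) =====
-- stated objective: alternative
-- what changed: Replaced the augmented bit-packed matrix [rows | I] fed to a generic one-pass Gauss-Jordan helper by a two-phase elimination on an unpacked state of (row, inverse-accumulator) pairs: forward elimination to upper-triangular form that returns None as soon as a pivot column is dead, then a separate back-substitution pass clearing the above-diagonal entries.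
import Mathlib
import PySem

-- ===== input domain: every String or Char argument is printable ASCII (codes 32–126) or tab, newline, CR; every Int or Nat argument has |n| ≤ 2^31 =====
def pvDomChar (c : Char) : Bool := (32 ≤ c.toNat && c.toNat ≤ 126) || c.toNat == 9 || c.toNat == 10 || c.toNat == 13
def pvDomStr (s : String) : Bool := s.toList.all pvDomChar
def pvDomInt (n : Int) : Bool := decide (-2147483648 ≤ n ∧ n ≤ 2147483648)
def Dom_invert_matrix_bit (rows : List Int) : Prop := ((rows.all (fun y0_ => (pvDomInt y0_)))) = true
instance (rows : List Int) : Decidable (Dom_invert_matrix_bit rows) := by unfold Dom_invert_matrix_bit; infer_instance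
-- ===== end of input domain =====

-- B replaces the packed augmented-matrix one-pass Gauss-Jordan by a two-phase
-- elimination (forward pass, then back-substitution) on unpacked (row, inverse) pairs;
-- same cost class, different decomposition (objective: alternative).

-- ===== PORT A =====
def gjElim (ws : List Nat) (rows : List Int) (rank : Nat) : List Int × Nat :=
  match ws with
  | [] => (rows, rank)
  | w :: tl =>
    if rows.length ≤ rank then (rows, rank)        -- 'if rank >= n_rows: break'
    else
      let col : List Int := rows.map (fun a => PySem.Int.band (Int.shiftRight a w) 1)
      if (col.drop rank).all (fun c => c == 0) then gjElim tl rows rank   -- 'if not any(col[rank:]): continue'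
      else
        let h := rank + (col.drop rank).findIdx (fun c => c == 1)        -- 'h = col.index(1, rank)'
        let pivot := rows.getD h 0                                        -- h is in range: index found above
        let rows1 := (rows.zip col).map (fun rc => if rc.2 == 0 then rc.1 else PySem.Int.bxor rc.1 pivot)
        let rows2 := (rows1.set h (rows1.getD rank 0)).set rank pivot
        gjElim tl rows2 (rank + 1)

def gauss_jordan_bit (rows : List Int) (n_cols n_rhs : Nat) : List Int × Nat :=
  gjElim (List.range' n_rhs (n_cols - n_rhs)).reverse rows 0   -- 'for w in reversed(range(n_rhs, n_cols))'

def invert_matrix_bit (rows : List Int) : Option (List Int) :=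
  let W := rows.length
  let mat := rows.zipIdx.map (fun p => PySem.Int.bor (Int.shiftLeft p.1 W) (Int.shiftLeft 1 (W - p.2 - 1)))
  let res := gauss_jordan_bit mat (W * 2) W
  if res.2 < W then none
  else some (res.1.map (fun row => PySem.Int.band row (Int.shiftLeft 1 W - 1)))

-- ===== PORT B =====
def pivotSearch (st : List (Int × Int)) (bit : Nat) (k : Nat) : Option Nat :=
  ((st.drop k).findIdx? (fun r => PySem.Int.band (Int.shiftRight r.1 bit) 1 == 1)).map (k + ·)

def elimRow (pr : Int × Int) (bit : Nat) (r : Int × Int) : Int × Int :=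
  if PySem.Int.band (Int.shiftRight r.1 bit) 1 == 1 then
    (PySem.Int.bxor r.1 pr.1, PySem.Int.bxor r.2 pr.2)
  else r

def swapRows (st : List (Int × Int)) (k p : Nat) : List (Int × Int) :=
  (st.set k (st.getD p (0, 0))).set p (st.getD k (0, 0))

def fwdElim (st : List (Int × Int)) (k fuel : Nat) : Option (List (Int × Int)) :=
  match fuel with
  | 0 => some st
  | fuel' + 1 =>
    let bit := st.length - 1 - k
    match pivotSearch st bit k with
    | none => none
    | some p =>
      let st1 := swapRows st k p
      let pr := st1.getD k (0, 0)
      let st2 := st1.zipIdx.map (fun q => if k < q.2 then elimRow pr bit q.1 else q.1)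
      fwdElim st2 (k + 1) fuel'

def backSub (st : List (Int × Int)) (k fuel : Nat) : List (Int × Int) :=
  match fuel with
  | 0 => st
  | fuel' + 1 =>
    let bit := st.length - 1 - k
    let pr := st.getD k (0, 0)
    let st1 := st.zipIdx.map (fun q => if q.2 < k then elimRow pr bit q.1 else q.1)
    backSub st1 (k + 1) fuel'

def invert_matrix_bit_alt (rows : List Int) : Option (List Int) :=
  let n := rows.length
  let st0 := rows.zipIdx.map (fun p => (p.1, Int.shiftLeft 1 (n - p.2 - 1)))
  match fwdElim st0 0 n with
  | none => none
  | some st => some ((backSub st 0 n).map (·.2))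

-- ===== PRECONDITION & SPEC =====
def Spec_invert_matrix_bit (rows : List Int) (out : Option (List Int)) : Prop := out = invert_matrix_bit_alt rows
instance (rows : List Int) (out : Option (List Int)) : Decidable (Spec_invert_matrix_bit rows out) := by unfold Spec_invert_matrix_bit; infer_instance

-- ===== CLAIM (what is proved, stated in full; the proofs are below) =====
def Claim_equal_invert_matrix_bit : Prop := ∀ (rows : List Int), Dom_invert_matrix_bit rows → Spec_invert_matrix_bit rows (invert_matrix_bit rows)

-- ===== LEMMAS AND PROOFS =====

-- proof device: one full-elimination step of the one-pass Gauss-Jordan, on pairs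
def gjStep (st : List (Int × Int)) (k p bit : Nat) : List (Int × Int) :=
  let st1 := swapRows st k p
  let pr := st1.getD k (0, 0)
  st1.zipIdx.map (fun q => if q.2 = k then q.1 else elimRow pr bit q.1)

-- proof device: the one-pass Gauss-Jordan of A, on unpacked (row, inverse) pairs
def gjP (st : List (Int × Int)) (k fuel : Nat) : Option (List (Int × Int)) :=
  match fuel with
  | 0 => some st
  | fuel' + 1 =>
    match pivotSearch st (st.length - 1 - k) k with
    | none => none
    | some p => gjP (gjStep st k p (st.length - 1 - k)) (k + 1) fuel'

-- clearing the rows above k with pivot row k (one back-substitution step)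
def clearAbove (k bit : Nat) (st : List (Int × Int)) : List (Int × Int) :=
  st.zipIdx.map (fun q => if q.2 < k then elimRow (st.getD k (0, 0)) bit q.1 else q.1)

-- packing: a state pair (matrix row, inverse row) as A's augmented bit row
def pvPack (n : Nat) (r : Int × Int) : Int := PySem.Int.bor (Int.shiftLeft r.1 n) r.2

def loOK (n : Nat) (st : List (Int × Int)) : Prop := ∀ r ∈ st, 0 ≤ r.2 ∧ r.2 < 2 ^ n

-- ==== bit-level lemmas ====

theorem nat_or_shift_add {x c : Nat} (n : Nat) (hc : c < 2 ^ n) : x <<< n ||| c = x * 2 ^ n + c := by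
  have hhi : (x <<< n ||| c) / 2 ^ n = x := by
    rw [← Nat.shiftRight_eq_div_pow, Nat.shiftRight_or_distrib, Nat.shiftLeft_shiftRight,
      Nat.shiftRight_eq_div_pow, Nat.div_eq_of_lt hc, Nat.or_zero]
  have hlo : (x <<< n ||| c) % 2 ^ n = c := by
    rw [← Nat.and_two_pow_sub_one_eq_mod, Nat.and_or_distrib_right,
      Nat.and_two_pow_sub_one_eq_mod, Nat.and_two_pow_sub_one_eq_mod,
      Nat.shiftLeft_eq, Nat.mul_mod_left, Nat.mod_eq_of_lt hc, Nat.zero_or]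
  have hdm : (x <<< n ||| c) = 2 ^ n * ((x <<< n ||| c) / 2 ^ n) + (x <<< n ||| c) % 2 ^ n :=
    (Nat.div_add_mod _ _).symm
  rw [hdm, hhi, hlo, Nat.mul_comm]

theorem nat_testBit_or_shift {x c : Nat} (n j : Nat) (hc : c < 2 ^ n) :
    (x <<< n ||| c).testBit (n + j) = x.testBit j := by
  have hcbit : c.testBit (n + j) = false :=
    Nat.testBit_eq_false_of_lt (lt_of_lt_of_le hc (Nat.pow_le_pow_right (by norm_num) (by omega)))
  rw [Nat.testBit_or, hcbit, Bool.or_false, Nat.testBit_shiftLeft]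
  simp [Nat.add_comm n j]

theorem nat_xor_or_shift {x y c d : Nat} (n : Nat) (hc : c < 2 ^ n) (hd : d < 2 ^ n) :
    (x <<< n ||| c) ^^^ (y <<< n ||| d) = (x ^^^ y) <<< n ||| (c ^^^ d) := by
  apply Nat.eq_of_testBit_eq
  intro i
  rcases lt_or_ge i n with hi | hi
  · have h1 : ∀ z : Nat, (z <<< n).testBit i = false := by
      intro z; rw [Nat.testBit_shiftLeft]; simp [Nat.not_le.mpr hi]
    simp [Nat.testBit_xor, Nat.testBit_or, h1]
  · obtain ⟨j, rfl⟩ := Nat.exists_eq_add_of_le hi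
    rw [Nat.testBit_xor, nat_testBit_or_shift n j hc, nat_testBit_or_shift n j hd,
      nat_testBit_or_shift n j (Nat.xor_lt_two_pow hc hd), Nat.testBit_xor]

theorem nat_compl_sub {b : Nat} (n : Nat) (hb : b < 2 ^ n) : 2 ^ n - 1 - b = (2 ^ n - 1) ^^^ b := by
  induction n generalizing b with
  | zero => interval_cases b <;> simp
  | succ n ih =>
    have hq : b / 2 < 2 ^ n := by omega
    have h1 : 1 ≤ 2 ^ n := Nat.one_le_two_pow
    have hsplit : (2 ^ (n + 1) - 1) = ((2 ^ n - 1) <<< 1 ||| 1) := by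
      rw [nat_or_shift_add 1 (by norm_num)]; omega
    have hbsplit : b = ((b / 2) <<< 1 ||| b % 2) := by
      rw [nat_or_shift_add 1 (by omega)]; omega
    have hxlt : (1 : Nat) ^^^ b % 2 < 2 ^ 1 := Nat.xor_lt_two_pow (by norm_num) (by omega)
    rw [hsplit]
    conv_lhs => rw [hbsplit]
    conv_rhs => rw [hbsplit]
    rw [nat_xor_or_shift 1 (by norm_num) (by omega), nat_or_shift_add 1 hxlt,
      nat_or_shift_add 1 (by omega), ← ih hq]
    have hxv : (1 : Nat) ^^^ b % 2 = 1 - b % 2 := by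
      rcases Nat.mod_two_eq_zero_or_one b with h | h <;> rw [h] <;> rfl
    rw [hxv]
    omega

theorem bxor_ofNat_ofNat (x y : Nat) : PySem.Int.bxor (Int.ofNat x) (Int.ofNat y) = Int.ofNat (x ^^^ y) := by
  simp [PySem.Int.bxor, Int.ofNat_eq_natCast]
theorem bxor_ofNat_negSucc (x y : Nat) : PySem.Int.bxor (Int.ofNat x) (Int.negSucc y) = Int.negSucc (x ^^^ y) := by
  simp [PySem.Int.bxor, Int.ofNat_eq_natCast, Int.negSucc_eq]
  rw [if_neg (by omega)]; ring
theorem bxor_negSucc_ofNat (x y : Nat) : PySem.Int.bxor (Int.negSucc x) (Int.ofNat y) = Int.negSucc (x ^^^ y) := by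
  simp [PySem.Int.bxor, Int.ofNat_eq_natCast, Int.negSucc_eq]
  rw [if_neg (by omega)]; ring
theorem bxor_negSucc_negSucc (x y : Nat) : PySem.Int.bxor (Int.negSucc x) (Int.negSucc y) = Int.ofNat (x ^^^ y) := by
  simp [PySem.Int.bxor, Int.ofNat_eq_natCast, Int.negSucc_eq]
  rw [if_neg (by omega), if_neg (by omega)]
theorem bor_ofNat_ofNat (x y : Nat) : PySem.Int.bor (Int.ofNat x) (Int.ofNat y) = Int.ofNat (x ||| y) := by
  simp [PySem.Int.bor, Int.ofNat_eq_natCast]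
theorem bor_negSucc_ofNat (x y : Nat) : PySem.Int.bor (Int.negSucc x) (Int.ofNat y) = Int.negSucc (x - (x &&& y)) := by
  simp [PySem.Int.bor, Int.ofNat_eq_natCast, Int.negSucc_eq]
  rw [if_neg (by omega)]; ring
theorem band_ofNat_ofNat (x y : Nat) : PySem.Int.band (Int.ofNat x) (Int.ofNat y) = Int.ofNat (x &&& y) := by
  simp [PySem.Int.band, Int.ofNat_eq_natCast]
theorem band_negSucc_ofNat (x y : Nat) : PySem.Int.band (Int.negSucc x) (Int.ofNat y) = Int.ofNat (y - (y &&& x)) := by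
  simp [PySem.Int.band, Int.ofNat_eq_natCast, Int.negSucc_eq]
  omega
theorem shiftRight_ofNat (x s : Nat) : Int.shiftRight (Int.ofNat x) s = Int.ofNat (x >>> s) := rfl
theorem shiftRight_negSucc (x s : Nat) : Int.shiftRight (Int.negSucc x) s = Int.negSucc (x >>> s) := rfl
theorem shiftLeft_ofNat (x s : Nat) : Int.shiftLeft (Int.ofNat x) s = Int.ofNat (x <<< s) := rfl
theorem shiftLeft_negSucc (x s : Nat) : Int.shiftLeft (Int.negSucc x) s = Int.negSucc ((x + 1) <<< s - 1) := rfl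


-- K-support: all low n bits of (m+1)<<<n - 1 are set
theorem nat_K_eq (m n : Nat) : (m + 1) <<< n - 1 = m <<< n ||| (2 ^ n - 1) := by
  rw [nat_or_shift_add n (by have := Nat.one_le_two_pow (n := n); omega),
    Nat.shiftLeft_eq]
  have := Nat.one_le_two_pow (n := n)
  have h2 : (m + 1) * 2 ^ n = m * 2 ^ n + 2 ^ n := by ring
  omega

theorem nat_and_low (b n m : Nat) (hb : b < 2 ^ n) : ((m + 1) <<< n - 1) &&& b = b := by
  apply Nat.eq_of_testBit_eq
  intro i
  rw [Nat.testBit_land, nat_K_eq]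
  rcases lt_or_ge i n with hi | hi
  · rw [Nat.testBit_or]
    have : (2 ^ n - 1).testBit i = true := by
      rw [Nat.testBit_two_pow_sub_one]; simpa using hi
    simp [this]
  · have : b.testBit i = false :=
      Nat.testBit_eq_false_of_lt (lt_of_lt_of_le hb (Nat.pow_le_pow_right (by norm_num) hi))
    simp [this]

theorem pack_repr_ofNat (m bn n : Nat) :
    pvPack n (Int.ofNat m, (bn : Int)) = Int.ofNat (m <<< n ||| bn) := by
  show PySem.Int.bor (Int.shiftLeft (Int.ofNat m) n) _ = _
  rw [shiftLeft_ofNat]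
  exact_mod_cast bor_ofNat_ofNat (m <<< n) bn

theorem pack_repr_negSucc (m bn n : Nat) (hb : bn < 2 ^ n) :
    pvPack n (Int.negSucc m, (bn : Int)) = Int.negSucc (m <<< n ||| ((2 ^ n - 1) ^^^ bn)) := by
  show PySem.Int.bor (Int.shiftLeft (Int.negSucc m) n) _ = _
  rw [shiftLeft_negSucc]
  have h1 : PySem.Int.bor (Int.negSucc ((m + 1) <<< n - 1)) (bn : Int)
      = Int.negSucc (((m + 1) <<< n - 1) - (((m + 1) <<< n - 1) &&& bn)) := by
    exact_mod_cast bor_negSucc_ofNat ((m + 1) <<< n - 1) bn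
  rw [h1, nat_and_low bn n m hb]
  congr 1
  rw [nat_K_eq, nat_or_shift_add n (by have := Nat.one_le_two_pow (n := n); omega),
    ← nat_compl_sub n hb, nat_or_shift_add n (by have := Nat.one_le_two_pow (n := n); omega)]
  omega

theorem nb1 (z w : Nat) : (z >>> w) &&& 1 = (z.testBit w).toNat := by
  rw [Nat.and_one_is_mod]
  rcases Nat.mod_two_eq_zero_or_one (z >>> w) with h | h <;> rw [h] <;> simp [Nat.testBit, h]

theorem pack_bit (a b : Int) (n j : Nat) (h0 : 0 ≤ b) (h1 : b < 2 ^ n) :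
    PySem.Int.band (Int.shiftRight (pvPack n (a, b)) (n + j)) 1 = PySem.Int.band (Int.shiftRight a j) 1 := by
  obtain ⟨bn, rfl⟩ : ∃ bn : Nat, b = (bn : Int) := ⟨b.toNat, (Int.toNat_of_nonneg h0).symm⟩
  have hbn : bn < 2 ^ n := by exact_mod_cast h1
  have hone : (1 : Int) = Int.ofNat 1 := rfl
  cases a with
  | ofNat m =>
    rw [pack_repr_ofNat, shiftRight_ofNat, shiftRight_ofNat, hone, band_ofNat_ofNat, band_ofNat_ofNat,
      nb1, nb1, nat_testBit_or_shift n j hbn]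
  | negSucc m =>
    rw [pack_repr_negSucc m bn n hbn, shiftRight_negSucc, shiftRight_negSucc, hone,
      band_negSucc_ofNat, band_negSucc_ofNat, Nat.land_comm 1, Nat.land_comm 1, nb1, nb1,
      nat_testBit_or_shift n j (Nat.xor_lt_two_pow (by have := Nat.one_le_two_pow (n := n); omega) hbn)]

theorem xor_lemma1 (M b1 b2 : Nat) : b1 ^^^ (M ^^^ b2) = M ^^^ (b1 ^^^ b2) := by
  apply Nat.eq_of_testBit_eq; intro i
  simp only [Nat.testBit_xor]
  cases M.testBit i <;> cases b1.testBit i <;> cases b2.testBit i <;> rfl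

theorem xor_lemma2 (M b1 b2 : Nat) : (M ^^^ b1) ^^^ b2 = M ^^^ (b1 ^^^ b2) := Nat.xor_assoc ..

theorem xor_lemma3 (M b1 b2 : Nat) : (M ^^^ b1) ^^^ (M ^^^ b2) = b1 ^^^ b2 := by
  apply Nat.eq_of_testBit_eq; intro i
  simp only [Nat.testBit_xor]
  cases M.testBit i <;> cases b1.testBit i <;> cases b2.testBit i <;> rfl

theorem pack_xor (a₁ b₁ a₂ b₂ : Int) (n : Nat) (h₁ : 0 ≤ b₁) (h₁' : b₁ < 2 ^ n)
    (h₂ : 0 ≤ b₂) (h₂' : b₂ < 2 ^ n) :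
    PySem.Int.bxor (pvPack n (a₁, b₁)) (pvPack n (a₂, b₂))
      = pvPack n (PySem.Int.bxor a₁ a₂, PySem.Int.bxor b₁ b₂) := by
  obtain ⟨c₁, rfl⟩ : ∃ c : Nat, b₁ = (c : Int) := ⟨b₁.toNat, (Int.toNat_of_nonneg h₁).symm⟩
  obtain ⟨c₂, rfl⟩ : ∃ c : Nat, b₂ = (c : Int) := ⟨b₂.toNat, (Int.toNat_of_nonneg h₂).symm⟩
  have hc₁ : c₁ < 2 ^ n := by exact_mod_cast h₁'
  have hc₂ : c₂ < 2 ^ n := by exact_mod_cast h₂'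
  have hM : 2 ^ n - 1 < 2 ^ n := by have := Nat.one_le_two_pow (n := n); omega
  have hxc : c₁ ^^^ c₂ < 2 ^ n := Nat.xor_lt_two_pow hc₁ hc₂
  have hbx : PySem.Int.bxor (c₁ : Int) (c₂ : Int) = ((c₁ ^^^ c₂ : Nat) : Int) := by
    exact_mod_cast bxor_ofNat_ofNat c₁ c₂
  cases a₁ with
  | ofNat m₁ =>
    cases a₂ with
    | ofNat m₂ =>
      rw [pack_repr_ofNat, pack_repr_ofNat, bxor_ofNat_ofNat, bxor_ofNat_ofNat, hbx,
        nat_xor_or_shift n hc₁ hc₂, pack_repr_ofNat]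
    | negSucc m₂ =>
      rw [pack_repr_ofNat, pack_repr_negSucc m₂ c₂ n hc₂, bxor_ofNat_negSucc, bxor_ofNat_negSucc, hbx,
        nat_xor_or_shift n hc₁ (Nat.xor_lt_two_pow hM hc₂), xor_lemma1,
        pack_repr_negSucc _ _ n hxc]
  | negSucc m₁ =>
    cases a₂ with
    | ofNat m₂ =>
      rw [pack_repr_negSucc m₁ c₁ n hc₁, pack_repr_ofNat, bxor_negSucc_ofNat, bxor_negSucc_ofNat, hbx,
        nat_xor_or_shift n (Nat.xor_lt_two_pow hM hc₁) hc₂, xor_lemma2,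
        pack_repr_negSucc _ _ n hxc]
    | negSucc m₂ =>
      rw [pack_repr_negSucc m₁ c₁ n hc₁, pack_repr_negSucc m₂ c₂ n hc₂, bxor_negSucc_negSucc,
        bxor_negSucc_negSucc, hbx,
        nat_xor_or_shift n (Nat.xor_lt_two_pow hM hc₁) (Nat.xor_lt_two_pow hM hc₂), xor_lemma3,
        pack_repr_ofNat]

theorem mask_repr (n : Nat) : Int.shiftLeft 1 n - 1 = Int.ofNat (2 ^ n - 1) := by
  have h : Int.shiftLeft 1 n = Int.ofNat (1 <<< n) := rfl
  rw [h]
  have := Nat.one_le_two_pow (n := n)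
  simp [Int.ofNat_eq_natCast, Nat.shiftLeft_eq]

theorem pack_mask (a b : Int) (n : Nat) (h0 : 0 ≤ b) (h1 : b < 2 ^ n) :
    PySem.Int.band (pvPack n (a, b)) (Int.shiftLeft 1 n - 1) = b := by
  obtain ⟨bn, rfl⟩ : ∃ c : Nat, b = (c : Int) := ⟨b.toNat, (Int.toNat_of_nonneg h0).symm⟩
  have hbn : bn < 2 ^ n := by exact_mod_cast h1
  have h2 : 1 ≤ 2 ^ n := Nat.one_le_two_pow
  rw [mask_repr]
  cases a with
  | ofNat m =>
    rw [pack_repr_ofNat, band_ofNat_ofNat, Nat.and_two_pow_sub_one_eq_mod,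
      nat_or_shift_add n hbn, Nat.mul_add_mod', Nat.mod_eq_of_lt hbn]
    rfl
  | negSucc m =>
    rw [pack_repr_negSucc m bn n hbn, band_negSucc_ofNat, Nat.land_comm,
      Nat.and_two_pow_sub_one_eq_mod, ← nat_compl_sub n hbn,
      nat_or_shift_add n (by omega), Nat.mul_add_mod', Nat.mod_eq_of_lt (by omega)]
    have : 2 ^ n - 1 - (2 ^ n - 1 - bn) = bn := by omega
    rw [this]
    rfl

theorem band_one_cases (y : Int) : PySem.Int.band y 1 = 0 ∨ PySem.Int.band y 1 = 1 := by
  rw [PySem.Int.band_one]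
  have h1 := PySem.Int.mod_nonneg y (b := 2) (by norm_num)
  have h2 := PySem.Int.mod_lt y (b := 2) (by norm_num)
  omega

theorem bxor_lo_bounds (b₁ b₂ : Int) (n : Nat) (h₁ : 0 ≤ b₁) (h₁' : b₁ < 2 ^ n)
    (h₂ : 0 ≤ b₂) (h₂' : b₂ < 2 ^ n) :
    0 ≤ PySem.Int.bxor b₁ b₂ ∧ PySem.Int.bxor b₁ b₂ < 2 ^ n := by
  rw [PySem.Int.bxor_of_nonneg h₁ h₂]
  have hb1 : b₁.toNat < 2 ^ n := by zify; rw [Int.toNat_of_nonneg h₁]; exact_mod_cast h₁'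
  have hb2 : b₂.toNat < 2 ^ n := by zify; rw [Int.toNat_of_nonneg h₂]; exact_mod_cast h₂'
  have := Nat.xor_lt_two_pow hb1 hb2
  constructor
  · exact Int.natCast_nonneg _
  · exact_mod_cast this

-- ==== list toolkit ====
theorem getElem?_zipIdx_map {α : Type} (g : α × Nat → α) (l : List α) (i : Nat) :
    (l.zipIdx.map g)[i]? = l[i]?.map (fun r => g (r, i)) := by
  simp [List.getElem?_map, List.getElem?_zipIdx, Option.map_map]
  rfl

theorem getElem?_swapRows (st : List (Int × Int)) (k p i : Nat) (hk : k < st.length) (hp : p < st.length) :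
    (swapRows st k p)[i]? = if i = p then st[k]? else if i = k then st[p]? else st[i]? := by
  simp only [swapRows, List.getElem?_set, List.length_set]
  rcases eq_or_ne i p with rfl | hip
  · simp [hp, hk, List.getD_eq_getElem?_getD, List.getElem?_eq_getElem hk]
  · rcases eq_or_ne i k with rfl | hikk
    · simp only [if_neg (Ne.symm hip), if_neg hip, if_pos hk,
        List.getD_eq_getElem?_getD, List.getElem?_eq_getElem hp]
      rfl
    · simp [Ne.symm hip, Ne.symm hikk, hip, hikk]

-- ==== rank bound for A's loop ====
theorem gjElim_rank_le (ws : List Nat) (rows : List Int) (rank : Nat) :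
    (gjElim ws rows rank).2 ≤ rank + ws.length := by
  induction ws generalizing rows rank with
  | nil => simp [gjElim]
  | cons w tl ih =>
    simp only [gjElim]
    split
    · simp
    · split
      · exact le_trans (ih _ _) (by simp)
      · exact le_trans (ih _ _) (by simp; omega)

-- ==== A ≡ gjP (packing bisimulation) ====
theorem pivotSearch_none_iff (st : List (Int × Int)) (bit k : Nat) :
    pivotSearch st bit k = none ↔
      ((st.map (fun r => PySem.Int.band (Int.shiftRight r.1 bit) 1)).drop k).all (fun c => c == 0) = true := by
  rw [pivotSearch, Option.map_eq_none_iff, List.findIdx?_eq_none_iff, ← List.map_drop, List.all_eq_true]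
  constructor
  · intro h c hc
    obtain ⟨r, hr, rfl⟩ := List.mem_map.mp hc
    have := h r hr
    rcases band_one_cases (Int.shiftRight r.1 bit) with h0 | h1
    · simp [h0]
    · simp [h1] at this
  · intro h r hr
    have := h _ (List.mem_map_of_mem (f := fun r => PySem.Int.band (Int.shiftRight r.1 bit) 1) hr)
    simp at this ⊢
    omega

theorem pivotSearch_some (st : List (Int × Int)) (bit k p : Nat) (h : pivotSearch st bit k = some p) :
    k ≤ p ∧ p < st.length ∧
      p = k + ((st.map (fun r => PySem.Int.band (Int.shiftRight r.1 bit) 1)).drop k).findIdx (fun c => c == 1) := by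
  rw [pivotSearch, Option.map_eq_some_iff] at h
  obtain ⟨j, hj, rfl⟩ := h
  rw [List.findIdx?_eq_some_iff_findIdx_eq] at hj
  obtain ⟨hjlt, hji⟩ := hj
  refine ⟨Nat.le_add_right _ _, by simp at hjlt; omega, ?_⟩
  rw [← List.map_drop, List.findIdx_map]
  congr 1
  rw [← hji]
  rfl

theorem getD_map_pack (n : Nat) (st : List (Int × Int)) (p : Nat) (hp : p < st.length) :
    (st.map (pvPack n)).getD p 0 = pvPack n (st.getD p (0, 0)) := by
  rw [List.getD_eq_getElem?_getD, List.getElem?_map, List.getD_eq_getElem?_getD,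
    List.getElem?_eq_getElem hp]
  rfl

theorem getD_swapRows_k (st : List (Int × Int)) (k p : Nat) (hk : k < st.length) (hp : p < st.length) :
    (swapRows st k p).getD k (0, 0) = st.getD p (0, 0) := by
  rw [List.getD_eq_getElem?_getD, getElem?_swapRows st k p k hk hp]
  rcases eq_or_ne k p with rfl | h
  · rw [if_pos rfl, List.getD_eq_getElem?_getD]
  · rw [if_neg h, if_pos rfl, List.getD_eq_getElem?_getD]

theorem getD_mem {α : Type} (l : List α) (i : Nat) (d : α) (h : i < l.length) : l.getD i d ∈ l := by
  rw [List.getD_eq_getElem?_getD, List.getElem?_eq_getElem h]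
  exact List.getElem_mem h

theorem elim_pack (n bit : Nat) (r pr : Int × Int)
    (hr0 : 0 ≤ r.2) (hr1 : r.2 < 2 ^ n) (hp0 : 0 ≤ pr.2) (hp1 : pr.2 < 2 ^ n) :
    (if (PySem.Int.band (Int.shiftRight (pvPack n r) (n + bit)) 1 == 0) = true then pvPack n r
     else PySem.Int.bxor (pvPack n r) (pvPack n pr)) = pvPack n (elimRow pr bit r) := by
  have hb : PySem.Int.band (Int.shiftRight (pvPack n r) (n + bit)) 1
      = PySem.Int.band (Int.shiftRight r.1 bit) 1 := by
    have := pack_bit r.1 r.2 n bit hr0 hr1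
    simpa using this
  rcases band_one_cases (Int.shiftRight r.1 bit) with h0 | h1
  · simp [elimRow, hb, h0]
  · have hx := pack_xor r.1 r.2 pr.1 pr.2 n hr0 hr1 hp0 hp1
    simp only [hb, h1]
    simp [elimRow, h1]
    simpa using hx

theorem stepA_eq (n k p : Nat) (st : List (Int × Int)) (rows col : List Int) (pivot : Int)
    (rows1 : List Int) (hlen : st.length = n) (hok : loOK n st) (hk : k < n) (hp : p < n)
    (hrows : rows = st.map (pvPack n))
    (hcolD : col = rows.map (fun a => PySem.Int.band (Int.shiftRight a (n + (n - 1 - k))) 1))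
    (hpivD : pivot = rows.getD p 0)
    (hrows1D : rows1 = (rows.zip col).map (fun rc => if rc.2 == 0 then rc.1 else PySem.Int.bxor rc.1 pivot)) :
    (rows1.set p (rows1.getD k 0)).set k pivot
    = (gjStep st k p (n - 1 - k)).map (pvPack n) := by
  subst hrows hcolD hpivD hrows1D
  have hkl : k < st.length := by omega
  have hpl : p < st.length := by omega
  have hsp := hok _ (getD_mem st p (0,0) hpl)
  have hsk := hok _ (getD_mem st k (0,0) hkl)
  set rows := st.map (pvPack n) with hrowsdef
  set pivot := rows.getD p 0 with hpivdef
  set col := rows.map (fun a => PySem.Int.band (Int.shiftRight a (n + (n - 1 - k))) 1) with hcoldef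
  set rows1 := (rows.zip col).map (fun rc => if rc.2 == 0 then rc.1 else PySem.Int.bxor rc.1 pivot) with hrows1def
  have hpivot : pivot = pvPack n (st.getD p (0,0)) := getD_map_pack n st p hpl
  have hrowslen : rows.length = n := by simp [hrowsdef, hlen]
  have hcollen : col.length = n := by simp [hcoldef, hrowslen]
  have hrows1 : ∀ i : Nat, rows1[i]? = st[i]?.map (fun r =>
      if (PySem.Int.band (Int.shiftRight (pvPack n r) (n + (n - 1 - k))) 1 == 0) = true then pvPack n r
      else PySem.Int.bxor (pvPack n r) pivot) := by
    intro i
    simp only [hrows1def, List.getElem?_map, List.zip_eq_zipWith, List.getElem?_zipWith, hcoldef,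
      List.getElem?_map, hrowsdef]
    cases st[i]? <;> rfl
  have hrows1len : rows1.length = n := by
    simp [hrows1def, hrowslen, hcollen]
  apply List.ext_getElem?
  intro i
  rw [List.getElem?_map]
  simp only [gjStep]
  rw [getElem?_zipIdx_map, getElem?_swapRows st k p i hkl hpl, getD_swapRows_k st k p hkl hpl]
  simp only [List.getElem?_set, List.length_set, hrows1len]
  rcases eq_or_ne i k with rfl | hik
  · rw [if_pos rfl, if_pos (by omega)]
    rcases eq_or_ne i p with rfl | hip
    · rw [if_pos rfl, hpivot, List.getD_eq_getElem?_getD, List.getElem?_eq_getElem hpl]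
      simp
    · rw [if_neg hip, hpivot, List.getD_eq_getElem?_getD, List.getElem?_eq_getElem hpl]
      simp
  · rw [if_neg (Ne.symm hik)]
    rcases eq_or_ne i p with rfl | hip
    · -- i = p ≠ k
      rw [if_pos rfl, if_pos (by omega), List.getD_eq_getElem?_getD, hrows1 k,
        List.getElem?_eq_getElem hkl]
      have hgk : st[k] = st.getD k (0,0) := by
        rw [List.getD_eq_getElem?_getD, List.getElem?_eq_getElem hkl]; rfl
      simp only [Option.map_some, Option.getD_some, List.getElem?_eq_getElem hkl, if_pos rfl,
        if_neg hik, hgk, hpivot]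
      exact congrArg some (elim_pack n (n - 1 - k) _ _ hsk.1 hsk.2 hsp.1 hsp.2)
    · rw [if_neg (Ne.symm hip), if_neg hip, hrows1 i]
      rcases lt_or_ge i st.length with hi | hi
      · have hgi : st[i] = st.getD i (0,0) := by
          rw [List.getD_eq_getElem?_getD, List.getElem?_eq_getElem hi]; rfl
        have hsi := hok _ (getD_mem st i (0,0) hi)
        rw [List.getElem?_eq_getElem hi]
        simp only [Option.map_some, if_neg hik, hgi, hpivot]
        exact congrArg some (elim_pack n (n - 1 - k) _ _ hsi.1 hsi.2 hsp.1 hsp.2)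
      · rw [List.getElem?_eq_none (by omega)]
        simp [hik]

theorem mem_swapRows (st : List (Int × Int)) (k p : Nat) (r : Int × Int)
    (hk : k < st.length) (hp : p < st.length) (hr : r ∈ swapRows st k p) : r ∈ st := by
  rw [List.mem_iff_getElem?] at hr
  obtain ⟨i, hi⟩ := hr
  rw [getElem?_swapRows st k p i hk hp] at hi
  split at hi
  · exact List.mem_of_getElem? hi
  · split at hi
    · exact List.mem_of_getElem? hi
    · exact List.mem_of_getElem? hi

theorem length_gjStep (st : List (Int × Int)) (k p bit : Nat) : (gjStep st k p bit).length = st.length := by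
  simp [gjStep, swapRows]

theorem loOK_elimRow (n bit : Nat) (pr r : Int × Int) (hpr : 0 ≤ pr.2 ∧ pr.2 < 2 ^ n)
    (hr : 0 ≤ r.2 ∧ r.2 < 2 ^ n) : 0 ≤ (elimRow pr bit r).2 ∧ (elimRow pr bit r).2 < 2 ^ n := by
  rw [elimRow]
  split
  · exact bxor_lo_bounds r.2 pr.2 n hr.1 hr.2 hpr.1 hpr.2
  · exact hr

theorem loOK_gjStep (n : Nat) (st : List (Int × Int)) (k p bit : Nat) (hok : loOK n st)
    (hk : k < st.length) (hp : p < st.length) : loOK n (gjStep st k p bit) := by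
  intro r hr
  simp only [gjStep] at hr
  rw [List.mem_map] at hr
  obtain ⟨q, hq, rfl⟩ := hr
  have hq1 : q.1 ∈ swapRows st k p := List.fst_mem_of_mem_zipIdx hq
  have hq1' := hok _ (mem_swapRows st k p q.1 hk hp hq1)
  have hpr := hok _ (mem_swapRows st k p _ hk hp
    (getD_mem (swapRows st k p) k (0,0) (by simp [swapRows]; omega)))
  split
  · exact hq1'
  · exact loOK_elimRow n bit _ _ hpr hq1'

theorem col_pack (n bit : Nat) (st : List (Int × Int)) (hok : loOK n st) :
    (st.map (pvPack n)).map (fun a => PySem.Int.band (Int.shiftRight a (n + bit)) 1)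
      = st.map (fun r => PySem.Int.band (Int.shiftRight r.1 bit) 1) := by
  rw [List.map_map]
  apply List.map_congr_left
  intro r hr
  have h := hok r hr
  have hb := pack_bit r.1 r.2 n bit h.1 h.2
  simpa using hb

-- port-A body, mirrored for iteration (real file already has it)

theorem gjElim_gjP (n : Nat) : ∀ (fuel k : Nat) (st : List (Int × Int)),
    st.length = n → k + fuel = n → loOK n st →
    (∀ st', gjP st k fuel = some st' →
        gjElim ((List.range' n fuel).reverse) (st.map (pvPack n)) k = (st'.map (pvPack n), n)) ∧
    (gjP st k fuel = none → (gjElim ((List.range' n fuel).reverse) (st.map (pvPack n)) k).2 < n) := by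
  intro fuel
  induction fuel with
  | zero =>
    intro k st hlen hkf hok
    refine ⟨fun st' h => ?_, fun h => ?_⟩
    · simp only [gjP] at h
      cases h
      simp [gjElim]
      omega
    · simp [gjP] at h
  | succ fuel' ih =>
    intro k st hlen hkf hok
    have hkn : k < n := by omega
    have hws : (List.range' n (fuel'+1)).reverse = (n + fuel') :: (List.range' n fuel').reverse := by
      rw [List.range'_concat]; simp
    have hwbit : n + fuel' = n + (n - 1 - k) := by omega
    have hlenrows : (st.map (pvPack n)).length = n := by simp [hlen]
    have hcolpack := col_pack n (n - 1 - k) st hok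
    cases hps : pivotSearch st (n - 1 - k) k with
    | none =>
      have hgjp : gjP st k (fuel' + 1) = none := by
        simp only [gjP, hlen, hps]
      refine ⟨fun st' h => ?_, fun _ => ?_⟩
      · rw [hgjp] at h
        cases h
      have hallb : (((st.map (pvPack n)).map
          (fun a => PySem.Int.band (Int.shiftRight a (n + (n - 1 - k))) 1)).drop k).all
            (fun c => c == 0) = true := by
        rw [hcolpack]
        exact (pivotSearch_none_iff st (n - 1 - k) k).mp hps
      rw [hws]
      simp only [gjElim]
      rw [if_neg (by omega), hwbit, if_pos hallb]
      have := gjElim_rank_le ((List.range' n fuel').reverse) (st.map (pvPack n)) k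
      simp at this
      omega
    | some p =>
      obtain ⟨hkp, hplen, hpidx⟩ := pivotSearch_some st (n - 1 - k) k p hps
      have hpn : p < n := by omega
      have hgjp : gjP st k (fuel' + 1) = gjP (gjStep st k p (n - 1 - k)) (k + 1) fuel' := by
        simp only [gjP, hlen, hps]
      have hallb : ¬ ((((st.map (pvPack n)).map
          (fun a => PySem.Int.band (Int.shiftRight a (n + (n - 1 - k))) 1)).drop k).all
            (fun c => c == 0) = true) := by
        rw [hcolpack]
        intro hcontra
        rw [← pivotSearch_none_iff st (n - 1 - k) k] at hcontra
        rw [hps] at hcontra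
        cases hcontra
      have hhp : k + ((((st.map (pvPack n)).map
          (fun a => PySem.Int.band (Int.shiftRight a (n + (n - 1 - k))) 1)).drop k).findIdx
            (fun c => c == 1)) = p := by
        rw [hcolpack]; omega
      have hstep := stepA_eq n k p st _ _ _ _ hlen hok hkn hpn rfl rfl rfl rfl
      have hunf : gjElim ((List.range' n (fuel'+1)).reverse) (st.map (pvPack n)) k
          = gjElim ((List.range' n fuel').reverse) ((gjStep st k p (n - 1 - k)).map (pvPack n)) (k+1) := by
        rw [hws]
        simp only [gjElim]
        rw [if_neg (by omega), hwbit, if_neg hallb, hhp, hstep]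
      have hih := ih (k+1) (gjStep st k p (n - 1 - k))
        (by rw [length_gjStep]; exact hlen) (by omega)
        (loOK_gjStep n st k p (n - 1 - k) hok (by omega) (by omega))
      refine ⟨fun st' h => ?_, fun h => ?_⟩
      · rw [hgjp] at h
        rw [hunf]
        exact hih.1 st' h
      · rw [hgjp] at h
        rw [hunf]
        exact hih.2 h

-- ==== gjP ≡ fwdElim + backSub (reordering) ====
theorem length_clearAbove (k bit : Nat) (st : List (Int × Int)) :
    (clearAbove k bit st).length = st.length := by simp [clearAbove]

theorem getElem?_clearAbove (k bit : Nat) (st : List (Int × Int)) (i : Nat) :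
    (clearAbove k bit st)[i]? = st[i]?.map (fun r => if i < k then elimRow (st.getD k (0,0)) bit r else r) := by
  rw [clearAbove, getElem?_zipIdx_map]

theorem getElem?_clearAbove_ge (k bit : Nat) (st : List (Int × Int)) (i : Nat) (h : k ≤ i) :
    (clearAbove k bit st)[i]? = st[i]? := by
  rw [getElem?_clearAbove]
  cases st[i]? with
  | none => rfl
  | some r =>
    simp only [Option.map_some]
    rw [if_neg (by omega)]

theorem drop_clearAbove (k bit k' : Nat) (st : List (Int × Int)) (h : k ≤ k') :
    (clearAbove k bit st).drop k' = st.drop k' := by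
  apply List.ext_getElem?
  intro j
  rw [List.getElem?_drop, List.getElem?_drop, getElem?_clearAbove_ge k bit st (k' + j) (by omega)]

theorem getD_clearAbove_ge (k bit i : Nat) (st : List (Int × Int)) (h : k ≤ i) :
    (clearAbove k bit st).getD i (0,0) = st.getD i (0,0) := by
  rw [List.getD_eq_getElem?_getD, getElem?_clearAbove_ge k bit st i h, List.getD_eq_getElem?_getD]

theorem pivotSearch_clearAbove (k bit k' bit' : Nat) (st : List (Int × Int)) (h : k ≤ k') :
    pivotSearch (clearAbove k bit st) bit' k' = pivotSearch st bit' k' := by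
  rw [pivotSearch, pivotSearch, drop_clearAbove k bit k' st h]

theorem swap_clearAbove (k bit k' p' : Nat) (st : List (Int × Int)) (hkk : k < k') (hp : k' ≤ p')
    (hk'l : k' < st.length) (hp'l : p' < st.length) :
    swapRows (clearAbove k bit st) k' p' = clearAbove k bit (swapRows st k' p') := by
  have hkl : k' < (clearAbove k bit st).length := by rw [length_clearAbove]; omega
  have hpl : p' < (clearAbove k bit st).length := by rw [length_clearAbove]; omega
  have hgk : (swapRows st k' p').getD k (0,0) = st.getD k (0,0) := by
    rw [List.getD_eq_getElem?_getD, getElem?_swapRows st k' p' k hk'l hp'l,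
      if_neg (by omega), if_neg (by omega), List.getD_eq_getElem?_getD]
  apply List.ext_getElem?
  intro i
  rw [getElem?_swapRows _ k' p' i hkl hpl, getElem?_clearAbove k bit (swapRows st k' p') i,
    getElem?_swapRows st k' p' i hk'l hp'l, hgk]
  rcases eq_or_ne i p' with rfl | hip
  · rw [if_pos rfl, if_pos rfl, getElem?_clearAbove_ge k bit st k' (by omega)]
    cases st[k']? with
    | none => rfl
    | some r =>
      simp only [Option.map_some]
      rw [if_neg (by omega)]
  · rw [if_neg hip, if_neg hip]
    rcases eq_or_ne i k' with rfl | hik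
    · rw [if_pos rfl, if_pos rfl, getElem?_clearAbove_ge k bit st p' (by omega)]
      cases st[p']? with
      | none => rfl
      | some r =>
        simp only [Option.map_some]
        rw [if_neg (by omega)]
    · rw [if_neg hik, if_neg hik, getElem?_clearAbove]

theorem elimBelow_clearAbove (k bit k' bit' : Nat) (st : List (Int × Int)) (pr : Int × Int) (h : k < k') :
    ((clearAbove k bit st).zipIdx.map (fun q => if k' < q.2 then elimRow pr bit' q.1 else q.1))
      = clearAbove k bit (st.zipIdx.map (fun q => if k' < q.2 then elimRow pr bit' q.1 else q.1)) := by
  have hgk : (st.zipIdx.map (fun q => if k' < q.2 then elimRow pr bit' q.1 else q.1)).getD k (0,0)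
      = st.getD k (0,0) := by
    rw [List.getD_eq_getElem?_getD, getElem?_zipIdx_map, List.getD_eq_getElem?_getD]
    cases st[k]? with
    | none => rfl
    | some r =>
      simp only [Option.map_some, Option.getD_some]
      rw [if_neg (by omega)]
  apply List.ext_getElem?
  intro i
  rw [getElem?_zipIdx_map, getElem?_clearAbove, getElem?_clearAbove, hgk, getElem?_zipIdx_map]
  cases st[i]? with
  | none => rfl
  | some r =>
    simp only [Option.map_some]
    split_ifs <;> first | rfl | omega

theorem fwdElim_clearAbove (k bit : Nat) : ∀ (fuel k' : Nat) (st : List (Int × Int)), k < k' →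
    fwdElim (clearAbove k bit st) k' fuel = (fwdElim st k' fuel).map (clearAbove k bit) := by
  intro fuel
  induction fuel with
  | zero => intro k' st h; rfl
  | succ fuel' ih =>
    intro k' st h
    simp only [fwdElim, length_clearAbove]
    rw [pivotSearch_clearAbove k bit k' _ st (by omega)]
    cases hps : pivotSearch st (st.length - 1 - k') k' with
    | none => rfl
    | some p' =>
      dsimp only
      obtain ⟨hkp, hpl, -⟩ := pivotSearch_some st (st.length - 1 - k') k' p' hps
      rw [swap_clearAbove k bit k' p' st h hkp (by omega) hpl,
        getD_clearAbove_ge k bit k' _ (by omega),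
        elimBelow_clearAbove k bit k' _ _ _ h, ih (k'+1) _ (by omega)]

theorem fwdElim_length : ∀ (fuel k : Nat) (st s : List (Int × Int)),
    fwdElim st k fuel = some s → s.length = st.length := by
  intro fuel
  induction fuel with
  | zero => intro k st s h; cases h; rfl
  | succ fuel' ih =>
    intro k st s h
    simp only [fwdElim] at h
    cases hps : pivotSearch st (st.length - 1 - k) k with
    | none => rw [hps] at h; cases h
    | some p =>
      rw [hps] at h
      have := ih _ _ _ h
      rw [this]
      simp [swapRows]

theorem gjStep_eq_clearAbove (st : List (Int × Int)) (k p bit : Nat) (hkp : k ≤ p) (hpl : p < st.length) :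
    gjStep st k p bit = clearAbove k bit
      ((swapRows st k p).zipIdx.map (fun q =>
        if k < q.2 then elimRow ((swapRows st k p).getD k (0,0)) bit q.1 else q.1)) := by
  have hkl : k < st.length := by omega
  have hswl : k < (swapRows st k p).length := by simp [swapRows]; omega
  have hgk : ((swapRows st k p).zipIdx.map (fun q =>
      if k < q.2 then elimRow ((swapRows st k p).getD k (0,0)) bit q.1 else q.1)).getD k (0,0)
      = (swapRows st k p).getD k (0,0) := by
    rw [List.getD_eq_getElem?_getD, getElem?_zipIdx_map, List.getD_eq_getElem?_getD]
    cases (swapRows st k p)[k]? with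
    | none => rfl
    | some r =>
      simp only [Option.map_some, Option.getD_some]
      rw [if_neg (by simp)]
  rw [gjStep]
  apply List.ext_getElem?
  intro i
  rw [getElem?_zipIdx_map, getElem?_clearAbove, hgk, getElem?_zipIdx_map]
  cases (swapRows st k p)[i]? with
  | none => rfl
  | some r =>
    simp only [Option.map_some]
    split_ifs <;> first | rfl | omega

theorem gjP_two_phase (n : Nat) : ∀ (fuel k : Nat) (st : List (Int × Int)),
    st.length = n → k + fuel = n →
    gjP st k fuel = (fwdElim st k fuel).map (fun s => backSub s k fuel) := by
  intro fuel
  induction fuel with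
  | zero => intro k st hlen hkf; rfl
  | succ fuel' ih =>
    intro k st hlen hkf
    simp only [gjP, fwdElim]
    cases hps : pivotSearch st (st.length - 1 - k) k with
    | none => rfl
    | some p =>
      dsimp only
      obtain ⟨hkp, hpl, -⟩ := pivotSearch_some st (st.length - 1 - k) k p hps
      set st2 := (swapRows st k p).zipIdx.map (fun q =>
        if k < q.2 then elimRow ((swapRows st k p).getD k (0,0)) (st.length - 1 - k) q.1 else q.1) with hst2
      have hst2len : st2.length = st.length := by
        rw [hst2]; simp [swapRows]
      have hCA : gjStep st k p (st.length - 1 - k) = clearAbove k (st.length - 1 - k) st2 :=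
        gjStep_eq_clearAbove st k p (st.length - 1 - k) hkp hpl
      rw [hCA, ih (k+1) _ (by rw [length_clearAbove, hst2len]; exact hlen) (by omega),
        fwdElim_clearAbove k (st.length - 1 - k) fuel' (k+1) st2 (by omega)]
      cases hfs : fwdElim st2 (k + 1) fuel' with
      | none => rfl
      | some s =>
        have hslen : s.length = st.length := by rw [fwdElim_length fuel' (k+1) st2 s hfs, hst2len]
        simp only [Option.map_some]
        congr 1
        conv_rhs => rw [backSub]
        rw [← hslen]
        rfl

-- ==== loOK preserved along gjP ====
theorem loOK_gjP (n : Nat) : ∀ (fuel k : Nat) (st st' : List (Int × Int)),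
    loOK n st → gjP st k fuel = some st' → loOK n st' := by
  intro fuel
  induction fuel with
  | zero => intro k st st' hok h; cases h; exact hok
  | succ fuel' ih =>
    intro k st st' hok h
    simp only [gjP] at h
    cases hps : pivotSearch st (st.length - 1 - k) k with
    | none => rw [hps] at h; cases h
    | some p =>
      rw [hps] at h
      obtain ⟨hkp, hpl, -⟩ := pivotSearch_some st (st.length - 1 - k) k p hps
      exact ih _ _ _ (loOK_gjStep n st k p (st.length - 1 - k) hok (by omega) hpl) h

-- ==== assembling the verdict ====
theorem st0_map_pack (rows : List Int) :
    rows.zipIdx.map (fun p => PySem.Int.bor (Int.shiftLeft p.1 rows.length)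
        (Int.shiftLeft 1 (rows.length - p.2 - 1)))
      = (rows.zipIdx.map (fun p => (p.1, Int.shiftLeft 1 (rows.length - p.2 - 1)))).map
          (pvPack rows.length) := by
  rw [List.map_map]
  rfl

theorem loOK_st0 (rows : List Int) :
    loOK rows.length (rows.zipIdx.map (fun p => (p.1, Int.shiftLeft 1 (rows.length - p.2 - 1)))) := by
  intro r hr
  rw [List.mem_map] at hr
  obtain ⟨q, hq, rfl⟩ := hr
  obtain ⟨-, hlt, -⟩ := List.mem_zipIdx hq
  have hq2 : q.2 < rows.length := by
    have := List.mem_zipIdx (x := q.1) (i := q.2) (xs := rows) (k := 0) (by simpa using hq)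
    omega
  have hrepr : Int.shiftLeft 1 (rows.length - q.2 - 1) = Int.ofNat (1 <<< (rows.length - q.2 - 1)) := rfl
  constructor
  · rw [hrepr]; exact Int.ofNat_nonneg _
  · rw [hrepr, Nat.shiftLeft_eq, Int.ofNat_eq_natCast]
    have h1 : (1 : Nat) * 2 ^ (rows.length - q.2 - 1) = 2 ^ (rows.length - q.2 - 1) := by omega
    rw [h1]
    have h2 : 2 ^ (rows.length - q.2 - 1) < 2 ^ rows.length :=
      Nat.pow_lt_pow_right (by norm_num) (by omega)
    calc ((2 ^ (rows.length - q.2 - 1) : Nat) : Int) < ((2 ^ rows.length : Nat) : Int) := by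
          exact_mod_cast h2
      _ = 2 ^ rows.length := by push_cast; rfl

theorem final_map_snd (n : Nat) (st' : List (Int × Int)) (hok : loOK n st') :
    (st'.map (pvPack n)).map (fun row => PySem.Int.band row (Int.shiftLeft 1 n - 1))
      = st'.map (fun r => r.2) := by
  rw [List.map_map]
  apply List.map_congr_left
  intro r hr
  have h := hok r hr
  have := pack_mask r.1 r.2 n h.1 h.2
  simpa using this

-- ===== VERDICT (by name: the statement is the Claim_ definition above) =====
theorem invert_matrix_bit_spec : Claim_equal_invert_matrix_bit := by
  intro rows _
  show invert_matrix_bit rows = invert_matrix_bit_alt rows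
  simp only [invert_matrix_bit, invert_matrix_bit_alt, gauss_jordan_bit]
  set n := rows.length with hn
  set st0 := rows.zipIdx.map (fun p => (p.1, Int.shiftLeft 1 (n - p.2 - 1))) with hst0
  have hst0len : st0.length = n := by simp [hst0]; omega
  have hok0 : loOK n st0 := loOK_st0 rows
  have hmat : rows.zipIdx.map (fun p => PySem.Int.bor (Int.shiftLeft p.1 n)
      (Int.shiftLeft 1 (n - p.2 - 1))) = st0.map (pvPack n) := st0_map_pack rows
  have hfuel : n * 2 - n = n := by omega
  have hmain := gjElim_gjP n n 0 st0 hst0len (by omega) hok0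
  have htwo := gjP_two_phase n n 0 st0 hst0len (by omega)
  rw [hmat, hfuel]
  cases hg : gjP st0 0 n with
  | none =>
    have hA := hmain.2 hg
    have hB : fwdElim st0 0 n = none := by
      rw [hg] at htwo
      cases hfw : fwdElim st0 0 n with
      | none => rfl
      | some s => rw [hfw] at htwo; cases htwo
    rw [hB]
    rw [if_pos hA]
  | some st' =>
    have hA := hmain.1 st' hg
    have hok' := loOK_gjP n n 0 st0 st' hok0 hg
    rw [hg] at htwo
    cases hfw : fwdElim st0 0 n with
    | none => rw [hfw] at htwo; cases htwo
    | some s =>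
      rw [hfw] at htwo
      simp only [Option.map_some] at htwo
      have hback : backSub s 0 n = st' := by
        injection htwo with h; exact h.symm
      rw [hA]
      rw [if_neg (by omega)]
      dsimp only
      rw [hback, final_map_snd n st' hok']
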